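-- pv_equiv track=rewrite | github.com/PR713/university-courses | algorithms-and-data-structures/Egz,kol/kolos_beautree/kol2.py | DFS
-- ===== SOURCE A (Python) =====
-- def DFS(G):
--     n = len(G) #adj
--     visited = [False for _ in range(n)]
--     cnt = 0
--     for v in range(n):
--         if not visited[v]:
--             DFSvisit(G,v,visited)
--             cnt += 1
--         if cnt == 2: return False
--     return True
--
-- def DFSvisit(G,s,visited):
--     visited[s] = True
--     for u,w in G[s]:
--         if not visited[u]:
--             DFSvisit(G,u,visited)
-- ===== SOURCE B (Python) =====
-- def DFS(G):
--     n = len(G)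
--     if n == 0:
--         return True
--     visited = [False] * n
--     stack = [0]
--     while stack:
--         node = stack.pop()
--         if visited[node]:
--             continue
--         visited[node] = True
--         for u, w in G[node]:
--             if not visited[u]:
--                 stack.append(u)
--     return all(visited)
-- ===== Notes on version B (the rewrite author's own statement) =====
-- stated objective: alternative
-- what changed: B replaces A's recursive DFSvisit plus outer per-vertex loop with a component counter by a single iterative explicit-stack traversal from vertex 0 followed by an all(visited) check (connected iff every vertex is DFS-reachable from vertex 0).
-- outside the precondition, e.g. on DFS([[], [], [(9, 9)]]): A returns False, B returns False
import Mathlib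
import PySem

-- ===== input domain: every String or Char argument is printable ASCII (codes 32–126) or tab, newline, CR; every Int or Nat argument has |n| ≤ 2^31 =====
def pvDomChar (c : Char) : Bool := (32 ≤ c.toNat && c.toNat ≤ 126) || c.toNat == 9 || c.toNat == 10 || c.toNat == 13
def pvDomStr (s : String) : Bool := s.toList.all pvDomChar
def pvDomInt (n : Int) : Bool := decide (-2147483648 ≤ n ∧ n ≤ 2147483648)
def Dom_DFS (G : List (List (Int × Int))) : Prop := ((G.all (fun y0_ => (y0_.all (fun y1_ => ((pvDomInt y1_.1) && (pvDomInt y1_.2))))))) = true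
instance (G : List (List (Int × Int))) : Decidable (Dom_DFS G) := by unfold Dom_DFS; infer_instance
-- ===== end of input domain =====

-- B replaces A's recursive per-component DFS with outer component counter by one iterative
-- stack-based traversal from vertex 0 followed by an all-visited check (alternative decomposition, same asymptotic cost).

-- ===== PORT A =====
-- DFSvisit(G, s, visited): the fuel argument is a termination guard only; DFS always
-- supplies fuel G.length, which is never exhausted (each nested call first marks a fresh vertex).
def dfsVisitA (G : List (List (Int × Int))) : Nat → Int → List Bool → List Bool
  | 0, _, visited => visited
  | fuel+1, s, visited =>
      (PySem.List.pyGetD G s []).foldl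
        (fun vis uw =>
          if PySem.List.pyGetD vis uw.1 false then vis
          else dfsVisitA G fuel uw.1 vis)
        (PySem.List.pySetD visited s true)

-- the 'for v in range(n)' loop of DFS, with its visited array and cnt counter
def dfsOuterA (G : List (List (Int × Int))) : List Int → List Bool → Int → Bool
  | [], _, _ => true
  | v :: vs, visited, cnt =>
      let st :=
        if PySem.List.pyGetD visited v false then (visited, cnt)
        else (dfsVisitA G G.length v visited, cnt + 1)
      if st.2 == 2 then false else dfsOuterA G vs st.1 st.2

def DFS (G : List (List (Int × Int))) : Bool :=
  dfsOuterA G (PySem.List.pyRange 0 G.length 1) (List.replicate G.length false) 0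

-- ===== PORT B =====
theorem pvSetTrueCountLtNat (v : List Bool) (k : Nat) (hk : k < v.length)
    (hv : v.getD k false = false) : (v.set k true).count false < v.count false := by
  induction v generalizing k with
  | nil => simp at hk
  | cons a tl ih =>
    cases k with
    | zero =>
      simp only [List.getD_cons_zero] at hv
      subst hv
      simp [List.count_cons]
    | succ k =>
      simp only [List.getD_cons_succ] at hv
      simp only [List.length_cons, Nat.succ_lt_succ_iff] at hk
      have := ih k hk hv
      simp only [List.set_cons_succ, List.count_cons]
      omega

-- termination helper for the stack loop (cited in decreasing_by): marking an unvisited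
-- in-range vertex strictly decreases the number of False entries.
theorem pvSetTrueCountLt (v : List Bool) (node : Int)
    (h : PySem.Raise.InRange v.length node)
    (hv : ¬ PySem.List.pyGetD v node false = true) :
    (PySem.List.pySetD v node true).count false < v.count false := by
  obtain ⟨h1, h2⟩ := h
  by_cases hpos : 0 ≤ node
  · have hidx : PySem.List.pyIdx? v.length node = some node.toNat := by
      unfold PySem.List.pyIdx?
      rw [if_pos hpos, if_pos h2]
    have hset : PySem.List.pySetD v node true = v.set node.toNat true := by
      unfold PySem.List.pySetD PySem.List.pySet?
      rw [hidx]; rfl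
    have hget : v.getD node.toNat false = false := by
      unfold PySem.List.pyGetD PySem.List.pyGet? at hv
      rw [hidx] at hv
      rw [List.getD_eq_getElem?_getD]
      simpa using hv
    rw [hset]
    exact pvSetTrueCountLtNat v node.toNat (by omega) hget
  · have hidx : PySem.List.pyIdx? v.length node = some (v.length - (-node).toNat) := by
      unfold PySem.List.pyIdx?
      rw [if_neg hpos, if_pos h1]
    have hset : PySem.List.pySetD v node true = v.set (v.length - (-node).toNat) true := by
      unfold PySem.List.pySetD PySem.List.pySet?
      rw [hidx]; rfl
    have hget : v.getD (v.length - (-node).toNat) false = false := by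
      unfold PySem.List.pyGetD PySem.List.pyGet? at hv
      rw [hidx] at hv
      rw [List.getD_eq_getElem?_getD]
      simpa using hv
    rw [hset]
    exact pvSetTrueCountLtNat v (v.length - (-node).toNat) (by omega) hget

-- the 'while stack' loop of B; top of stack = head of the list
def stackLoopB (G : List (List (Int × Int))) (visited : List Bool) (stack : List Int) :
    List Bool :=
  match stack with
  | [] => visited
  | node :: rest =>
    if hv : PySem.List.pyGetD visited node false = true then
      stackLoopB G visited rest
    else if h : PySem.Raise.InRange visited.length node then
      stackLoopB G (PySem.List.pySetD visited node true)
        ((((PySem.List.pyGetD G node []).filter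
            (fun uw => !PySem.List.pyGetD (PySem.List.pySetD visited node true) uw.1 false)).map
              (fun uw => uw.1)).reverse ++ rest)
    else visited  -- Python would raise IndexError here; unreachable under Pre_DFS
termination_by (visited.count false, stack.length)
decreasing_by
  · exact Prod.Lex.right _ (by simp)
  · exact Prod.Lex.left _ _ (pvSetTrueCountLt visited node h hv)

def DFS_alt (G : List (List (Int × Int))) : Bool :=
  if G.length = 0 then true
  else (stackLoopB G (List.replicate G.length false) [0]).all (fun b => b)

-- ===== PRECONDITION & SPEC =====
-- Pre_ requires every listed neighbour index to be a valid Python index into the vertex list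
-- (-n ≤ u < n).  Outside Pre_, A raises IndexError whenever its traversal reaches a bad edge;
-- A can still return False when the bad edge sits in a component beyond the second one found,
-- because it returns before ever reading that row (B returns False there too).
def Pre_DFS (G : List (List (Int × Int))) : Prop :=
  ∀ row ∈ G, ∀ uw ∈ row, -(G.length : Int) ≤ uw.1 ∧ uw.1 < (G.length : Int)
instance (G : List (List (Int × Int))) : Decidable (Pre_DFS G) := by
  unfold Pre_DFS; infer_instance

def pvWitness_DFS : (List (List (Int × Int))) := [[(1, 0)], [(0, 5)]]

def Spec_DFS (G : List (List (Int × Int))) (out : Bool) : Prop := out = DFS_alt G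
instance (G : List (List (Int × Int))) (out : Bool) : Decidable (Spec_DFS G out) := by
  unfold Spec_DFS; infer_instance

-- ===== CLAIM (what is proved, stated in full; the proofs are below) =====
def Claim_equal_DFS : Prop := ∀ (G : List (List (Int × Int))), Dom_DFS G → Pre_DFS G → Spec_DFS G (DFS G)

-- ===== LEMMAS AND PROOFS =====

-- Python index normalisation: the Nat position a valid Python index i denotes in a list of length n
def wrapI (n : Nat) (i : Int) : Nat := if 0 ≤ i then i.toNat else n - (-i).toNat

-- the graph both traversals explore, as adjacency over normalised Nat vertices
def adjA (G : List (List (Int × Int))) (j : Nat) : List Nat :=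
  (G.getD j []).map (fun uw => wrapI G.length uw.1)

-- pointwise order on visited arrays (same length, true entries preserved)
def vle (v w : List Bool) : Prop :=
  v.length = w.length ∧ ∀ t, v.getD t false = true → w.getD t false = true

-- vertices newly reachable from s along edges whose endpoints are all unvisited in vis
inductive RA (adj : Nat → List Nat) (vis : List Bool) (s : Nat) : Nat → Prop
  | base : vis.getD s false = false → RA adj vis s s
  | step {u t : Nat} : RA adj vis s u → t ∈ adj u → vis.getD t false = false → RA adj vis s t

-- abstract counterpart of dfsVisitA over normalised vertices
def avisit (adj : Nat → List Nat) : Nat → Nat → List Bool → List Bool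
  | 0, _, vis => vis
  | f+1, s, vis =>
      (adj s).foldl (fun v u => if v.getD u false then v else avisit adj f u v) (vis.set s true)

-- abstract counterpart of stackLoopB over normalised vertices
def astack (adj : Nat → List Nat) (vis : List Bool) (stack : List Nat) : List Bool :=
  match stack with
  | [] => vis
  | node :: rest =>
    if hv : vis.getD node false = true then astack adj vis rest
    else if h : node < vis.length then
      astack adj (vis.set node true)
        (((adj node).filter (fun u => !(vis.set node true).getD u false)).reverse ++ rest)
    else vis
termination_by (vis.count false, stack.length)
decreasing_by
  · exact Prod.Lex.right _ (by simp)
  · exact Prod.Lex.left _ _ (pvSetTrueCountLtNat vis node h (by simpa using hv))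

-- ---- basic getD / set / count toolbox ----

theorem getD_true_lt (v : List Bool) (t : Nat) (h : v.getD t false = true) : t < v.length := by
  by_contra hlt
  push_neg at hlt
  rw [List.getD_eq_getElem?_getD, List.getElem?_eq_none (by omega)] at h
  simp at h

theorem getD_set_self (v : List Bool) (k : Nat) (hk : k < v.length) (b : Bool) :
    (v.set k b).getD k false = b := by
  simp [List.getD_eq_getElem?_getD, List.getElem?_set, hk]

theorem getD_set_ne (v : List Bool) (k t : Nat) (h : t ≠ k) (b : Bool) :
    (v.set k b).getD t false = v.getD t false := by
  simp [List.getD_eq_getElem?_getD, List.getElem?_set, Ne.symm h]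

theorem set_true_getD (v : List Bool) (k t : Nat) :
    (v.set k true).getD t false = true ↔ (t = k ∧ k < v.length) ∨ v.getD t false = true := by
  by_cases ht : t = k
  · subst ht
    by_cases hk : t < v.length
    · simp [getD_set_self v t hk, hk]
    · rw [List.set_eq_of_length_le (by omega)]
      constructor
      · intro h; exact Or.inr h
      · rintro (⟨_, h⟩ | h)
        · omega
        · exact h
  · rw [getD_set_ne v k t ht]
    constructor
    · intro h; exact Or.inr h
    · rintro (⟨h, _⟩ | h)
      · exact absurd h ht
      · exact h

theorem countPos (v : List Bool) (k : Nat) (hk : k < v.length) (hv : v.getD k false = false) :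
    0 < v.count false := by
  rw [List.getD_eq_getElem?_getD, List.getElem?_eq_getElem hk] at hv
  simp only [Option.getD_some] at hv
  exact List.count_pos_iff.mpr (hv ▸ List.getElem_mem hk)

theorem vle_refl (v : List Bool) : vle v v := ⟨rfl, fun _ h => h⟩

theorem vle_trans {u v w : List Bool} (h1 : vle u v) (h2 : vle v w) : vle u w :=
  ⟨h1.1.trans h2.1, fun t ht => h2.2 t (h1.2 t ht)⟩

theorem vle_set (v : List Bool) (k : Nat) : vle v (v.set k true) := by
  refine ⟨by simp, fun t ht => ?_⟩
  by_cases htk : t = k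
  · subst htk
    rw [getD_set_self v t (getD_true_lt v t ht)]
  · rw [getD_set_ne v k t htk]
    exact ht

theorem count_le_of_vle {v w : List Bool} (h : vle v w) : w.count false ≤ v.count false := by
  induction v generalizing w with
  | nil =>
    have : w = [] := List.length_eq_zero_iff.mp h.1.symm
    subst this; simp
  | cons a tl ih =>
    cases w with
    | nil => exact absurd h.1 (by simp)
    | cons b tw =>
      have hlen : tl.length = tw.length := by
        have := h.1; simp at this; exact this
      have hhead : a = true → b = true := by
        have := h.2 0
        simpa [List.getD_cons_zero] using this
      have htail : vle tl tw :=
        ⟨hlen, fun t ht => by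
          have := h.2 (t + 1)
          simpa [List.getD_cons_succ] using this ht⟩
      have hc := ih htail
      cases a with
      | true =>
        have hb : b = true := hhead rfl
        subst hb
        simpa using hc
      | false =>
        have e : (false :: tl).count false = tl.count false + 1 := by simp
        cases b with
        | true =>
          have e2 : (true :: tw).count false = tw.count false := by simp
          rw [e, e2]; omega
        | false =>
          have e2 : (false :: tw).count false = tw.count false + 1 := by simp
          rw [e, e2]; omega

-- ---- generic foldl lemmas ----

theorem foldl_pres {α : Type} (P : List Bool → Prop) (step : List Bool → α → List Bool)
    (l : List α) (h : ∀ v u, u ∈ l → P v → P (step v u)) (init : List Bool) (h0 : P init) :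
    P (l.foldl step init) := by
  induction l generalizing init with
  | nil => exact h0
  | cons u l ih =>
    exact ih (fun v x hx hp => h v x (List.mem_cons_of_mem _ hx) hp)
      (step init u) (h init u List.mem_cons_self h0)

theorem foldl_vle {α : Type} (step : List Bool → α → List Bool) (l : List α)
    (h : ∀ v u, u ∈ l → vle v (step v u)) (init : List Bool) : vle init (l.foldl step init) := by
  induction l generalizing init with
  | nil => exact vle_refl init
  | cons u l ih =>
    exact vle_trans (h init u List.mem_cons_self)
      (ih (fun v x hx => h v x (List.mem_cons_of_mem _ hx)) (step init u))

-- ---- RA lemmas ----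

theorem RA_unvis {adj : Nat → List Nat} {vis : List Bool} {s t : Nat} (h : RA adj vis s t) :
    vis.getD t false = false := by
  cases h with
  | base h => exact h
  | step _ _ h => exact h

theorem RA_trans {adj : Nat → List Nat} {vis : List Bool} {s u t : Nat}
    (h1 : RA adj vis s u) (h2 : RA adj vis u t) : RA adj vis s t := by
  induction h2 with
  | base _ => exact h1
  | step _ hmem hunvis ih => exact RA.step ih hmem hunvis

theorem RA_mono {adj : Nat → List Nat} {vis C : List Bool} {s t : Nat}
    (hle : vle vis C) (h : RA adj C s t) : RA adj vis s t := by
  have key : ∀ x, C.getD x false = false → vis.getD x false = false := by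
    intro x hx
    cases hb : vis.getD x false
    · rfl
    · have := hle.2 x hb; rw [this] at hx; exact absurd hx (by simp)
  induction h with
  | base h => exact RA.base (key _ h)
  | step _ hmem hunvis ih => exact RA.step ih hmem (key _ hunvis)

-- ---- avisit lemmas ----

theorem aviGrow (adj : Nat → List Nat) : ∀ (f : Nat) (s : Nat) (vis : List Bool),
    vle vis (avisit adj f s vis) := by
  intro f
  induction f with
  | zero => intro s vis; simp only [avisit]; exact vle_refl vis
  | succ f ih =>
    intro s vis
    simp only [avisit]
    refine vle_trans (vle_set vis s) (foldl_vle _ _ (fun v u _ => ?_) _)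
    by_cases hc : v.getD u false = true
    · simp only [hc, if_true]; exact vle_refl v
    · simp only [hc]; exact ih u v

theorem aviMarks (adj : Nat → List Nat) (f s : Nat) (vis : List Bool) (hf : 1 ≤ f)
    (hs : s < vis.length) : (avisit adj f s vis).getD s false = true := by
  match f, hf with
  | g+1, _ =>
    simp only [avisit]
    exact (foldl_vle _ _ (fun v u _ => by
      by_cases hc : v.getD u false = true
      · simp only [hc, if_true]; exact vle_refl v
      · simp only [hc]; exact aviGrow adj g u v) _).2 s
      (getD_set_self vis s hs true)

theorem aviSound (adj : Nat → List Nat) : ∀ (f : Nat) (s : Nat) (vis : List Bool) (t : Nat),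
    vis.getD s false = false → (avisit adj f s vis).getD t false = true →
    vis.getD t false = true ∨ RA adj vis s t := by
  intro f
  induction f with
  | zero =>
    intro s vis t _ h
    simp only [avisit] at h
    exact Or.inl h
  | succ f ih =>
    intro s vis t hvs h
    simp only [avisit] at h
    have hP := foldl_pres
      (fun C => vle vis C ∧
        ∀ x, C.getD x false = true → vis.getD x false = true ∨ RA adj vis s x)
      (fun v u => if v.getD u false then v else avisit adj f u v) (adj s)
      (fun v u hu hp => by
        by_cases hc : v.getD u false = true
        · simp only [hc, if_true]; exact hp
        · have hvu : v.getD u false = false := by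
            cases hb : v.getD u false
            · rfl
            · exact absurd hb hc
          simp only [hvu, Bool.false_eq_true, if_false]
          refine ⟨vle_trans hp.1 (aviGrow adj f u v), fun x hx => ?_⟩
          rcases ih u v x hvu hx with hxv | hrx
          · exact hp.2 x hxv
          · have hvu_vis : vis.getD u false = false := by
              cases hb : vis.getD u false
              · rfl
              · rw [hp.1.2 u hb] at hvu; exact absurd hvu (by simp)
            exact Or.inr (RA_trans (RA.step (RA.base hvs) hu hvu_vis) (RA_mono hp.1 hrx)))
      (vis.set s true)
      ⟨vle_set vis s, fun x hx => by
        rcases (set_true_getD vis s x).mp hx with ⟨he, _⟩ | hv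
        · subst he; exact Or.inr (RA.base hvs)
        · exact Or.inl hv⟩
    exact hP.2 t h

theorem aviSat (adj : Nat → List Nat) (n : Nat) (Hadj : ∀ j u, u ∈ adj j → u < n) :
    ∀ (f : Nat) (s : Nat) (vis : List Bool), vis.length = n → s < n →
    vis.getD s false = false → vis.count false ≤ f →
    ∀ x, (avisit adj f s vis).getD x false = true → vis.getD x false = false →
    ∀ t ∈ adj x, (avisit adj f s vis).getD t false = true := by
  intro f
  induction f with
  | zero =>
    intro s vis hlen hs hvs hf x hx hxv t ht
    have := countPos vis s (by omega) hvs
    omega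
  | succ f ih =>
    intro s vis hlen hs hvs hf
    simp only [avisit]
    have inner : ∀ (l : List Nat), (∀ u ∈ l, u ∈ adj s) → ∀ (C : List Bool),
        vle (vis.set s true) C → C.length = n → C.count false ≤ f →
        (∀ x, C.getD x false = true → vis.getD x false = false → x ≠ s →
          ∀ t ∈ adj x, C.getD t false = true) →
        (vle C (l.foldl (fun v u => if v.getD u false then v else avisit adj f u v) C)
         ∧ (l.foldl (fun v u => if v.getD u false then v else avisit adj f u v) C).length = n
         ∧ (l.foldl (fun v u => if v.getD u false then v else avisit adj f u v) C).count false ≤ f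
         ∧ (∀ x, (l.foldl (fun v u => if v.getD u false then v else avisit adj f u v) C).getD x false = true →
             vis.getD x false = false → x ≠ s →
             ∀ t ∈ adj x,
               (l.foldl (fun v u => if v.getD u false then v else avisit adj f u v) C).getD t false = true)
         ∧ (∀ u ∈ l,
             (l.foldl (fun v u => if v.getD u false then v else avisit adj f u v) C).getD u false = true)) := by
      intro l
      induction l with
      | nil =>
        intro _ C h1 h2 h3 h4
        exact ⟨vle_refl C, h2, h3, h4, by simp⟩
      | cons u l ihl =>
        intro hul C hleC hClen hCcount hCinv
        have hu_adj : u ∈ adj s := hul u List.mem_cons_self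
        rw [List.foldl_cons]
        by_cases hc : C.getD u false = true
        · have hstep : (if C.getD u false = true then C else avisit adj f u C) = C := if_pos hc
          rw [hstep]
          obtain ⟨g1, g2, g3, g4, g5⟩ :=
            ihl (fun x hx => hul x (List.mem_cons_of_mem _ hx)) C hleC hClen hCcount hCinv
          refine ⟨g1, g2, g3, g4, fun x hx => ?_⟩
          rcases List.mem_cons.mp hx with hxu | hxl
          · subst hxu; exact g1.2 x hc
          · exact g5 x hxl
        · have hcf : C.getD u false = false := by
            cases hb : C.getD u false
            · rfl
            · exact absurd hb hc
          have hstep : (if C.getD u false = true then C else avisit adj f u C)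
              = avisit adj f u C := if_neg hc
          rw [hstep]
          have hun : u < n := Hadj s u hu_adj
          have hc_pos : 0 < C.count false := countPos C u (by omega) hcf
          have hf1 : 1 ≤ f := le_trans hc_pos hCcount
          have hle1 : vle C (avisit adj f u C) := aviGrow adj f u C
          have hC1len : (avisit adj f u C).length = n := hle1.1 ▸ hClen
          have hC1count : (avisit adj f u C).count false ≤ f :=
            le_trans (count_le_of_vle hle1) hCcount
          have hC1inv : ∀ x, (avisit adj f u C).getD x false = true →
              vis.getD x false = false → x ≠ s →
              ∀ t ∈ adj x, (avisit adj f u C).getD t false = true := by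
            intro x hx hxvis hxs t ht
            by_cases hxC : C.getD x false = true
            · exact hle1.2 t (hCinv x hxC hxvis hxs t ht)
            · have hxCf : C.getD x false = false := by
                cases hb : C.getD x false
                · rfl
                · exact absurd hb hxC
              exact ih u C hClen hun hcf hCcount x hx hxCf t ht
          obtain ⟨g1, g2, g3, g4, g5⟩ :=
            ihl (fun x hx => hul x (List.mem_cons_of_mem _ hx)) (avisit adj f u C)
              (vle_trans hleC hle1) hC1len hC1count hC1inv
          refine ⟨vle_trans hle1 g1, g2, g3, g4, fun x hx => ?_⟩
          rcases List.mem_cons.mp hx with hxu | hxl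
          · subst hxu
            exact g1.2 x (aviMarks adj f x C hf1 (by omega))
          · exact g5 x hxl
    have hset_lt := pvSetTrueCountLtNat vis s (by omega) hvs
    obtain ⟨g1, g2, g3, g4, g5⟩ :=
      inner (adj s) (fun u hu => hu) (vis.set s true) (vle_refl _) (by simp [hlen]) (by omega)
        (fun x hx hxvis hxs t ht => by
          rcases (set_true_getD vis s x).mp hx with ⟨he, _⟩ | hv
          · exact absurd he hxs
          · rw [hv] at hxvis; exact absurd hxvis (by simp))
    intro x hx hxvis t ht
    by_cases hxs : x = s
    · subst hxs; exact g5 t ht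
    · exact g4 x hx hxvis hxs t ht

theorem aviComplete (adj : Nat → List Nat) (n : Nat) (Hadj : ∀ j u, u ∈ adj j → u < n)
    (f : Nat) (s : Nat) (vis : List Bool) (hlen : vis.length = n) (hs : s < n)
    (hvs : vis.getD s false = false) (hf : vis.count false ≤ f) :
    ∀ t, RA adj vis s t → (avisit adj f s vis).getD t false = true := by
  intro t hra
  induction hra with
  | base h =>
    have hf1 : 1 ≤ f := le_trans (countPos vis s (by omega) hvs) hf
    exact aviMarks adj f s vis hf1 (by omega)
  | step hru hmem hunvis ih =>
    exact aviSat adj n Hadj f s vis hlen hs hvs hf _ ih (RA_unvis hru) _ hmem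

-- ---- astack lemmas ----


theorem astack_nil (adj : Nat → List Nat) (vis : List Bool) : astack adj vis [] = vis := by
  rw [astack]

theorem astack_cons_vis (adj : Nat → List Nat) (vis : List Bool) (node : Nat) (rest : List Nat)
    (h : vis.getD node false = true) :
    astack adj vis (node :: rest) = astack adj vis rest := by
  rw [astack]
  exact dif_pos h

theorem astack_cons_unvis (adj : Nat → List Nat) (vis : List Bool) (node : Nat)
    (rest : List Nat) (hof : ¬ vis.getD node false = true) (hlt : node < vis.length) :
    astack adj vis (node :: rest) =
      astack adj (vis.set node true)
        (((adj node).filter (fun u => !(vis.set node true).getD u false)).reverse ++ rest) := by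
  rw [astack]
  rw [dif_neg hof, dif_pos hlt]

theorem stGrow (adj : Nat → List Nat) (vis : List Bool) (stack : List Nat) :
    vle vis (astack adj vis stack) := by
  fun_induction astack adj vis stack with
  | case1 vis => exact vle_refl vis
  | case2 vis node rest hv ih => exact ih
  | case3 vis node rest hv h ih => exact vle_trans (vle_set vis node) ih
  | case4 vis node rest hv h => exact vle_refl vis

theorem stMarks (adj : Nat → List Nat) (n : Nat) (Hadj : ∀ j u, u ∈ adj j → u < n)
    (vis : List Bool) (stack : List Nat) (hlen : vis.length = n)
    (hst : ∀ s ∈ stack, s < n) : ∀ s ∈ stack, (astack adj vis stack).getD s false = true := by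
  revert hlen hst
  fun_induction astack adj vis stack with
  | case1 vis => intro _ _ s hs; simp at hs
  | case2 vis node rest hv ih =>
    intro hlen hst s hs
    rcases List.mem_cons.mp hs with rfl | hs'
    · exact (stGrow adj vis rest).2 s hv
    · exact ih hlen (fun x hx => hst x (List.mem_cons_of_mem _ hx)) s hs'
  | case3 vis node rest hv h ih =>
    intro hlen hst s hs
    have hlen' : (vis.set node true).length = n := by simp [hlen]
    have hst' : ∀ x ∈ (((adj node).filter
        (fun u => !(vis.set node true).getD u false)).reverse ++ rest), x < n := by
      intro x hx
      rcases List.mem_append.mp hx with hx1 | hx2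
      · exact Hadj node x (List.mem_of_mem_filter (List.mem_reverse.mp hx1))
      · exact hst x (List.mem_cons_of_mem _ hx2)
    rcases List.mem_cons.mp hs with rfl | hs'
    · exact (stGrow adj _ _).2 s (getD_set_self vis s h true)
    · exact ih hlen' hst' s (List.mem_append.mpr (Or.inr hs'))
  | case4 vis node rest hv h =>
    intro hlen hst
    exact absurd (hlen ▸ hst node List.mem_cons_self) h

theorem stSat (adj : Nat → List Nat) (n : Nat) (Hadj : ∀ j u, u ∈ adj j → u < n)
    (vis : List Bool) (stack : List Nat) (hlen : vis.length = n) (hst : ∀ s ∈ stack, s < n) :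
    ∀ x, (astack adj vis stack).getD x false = true → vis.getD x false = false →
    ∀ t ∈ adj x, (astack adj vis stack).getD t false = true := by
  revert hlen hst
  fun_induction astack adj vis stack with
  | case1 vis =>
    intro hlen hst x hx hxv t ht
    rw [hx] at hxv
    exact absurd hxv (by simp)
  | case2 vis node rest hv ih =>
    intro hlen hst
    exact ih hlen (fun x hx => hst x (List.mem_cons_of_mem _ hx))
  | case3 vis node rest hv h ih =>
    intro hlen hst x hx hxv t ht
    have hlen' : (vis.set node true).length = n := by simp [hlen]
    have hst' : ∀ y ∈ (((adj node).filter
        (fun u => !(vis.set node true).getD u false)).reverse ++ rest), y < n := by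
      intro y hy
      rcases List.mem_append.mp hy with hy1 | hy2
      · exact Hadj node y (List.mem_of_mem_filter (List.mem_reverse.mp hy1))
      · exact hst y (List.mem_cons_of_mem _ hy2)
    by_cases hxn : x = node
    · subst hxn
      by_cases htv : (vis.set x true).getD t false = true
      · exact (stGrow adj _ _).2 t htv
      · have htp : t ∈ (adj x).filter (fun u => !(vis.set x true).getD u false) :=
          List.mem_filter.mpr ⟨ht, by rw [Bool.not_eq_true] at htv; simp only [htv, Bool.not_false]⟩
        exact stMarks adj n Hadj _ _ hlen' hst' t
          (List.mem_append.mpr (Or.inl (List.mem_reverse.mpr htp)))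
    · have hxv' : (vis.set node true).getD x false = false := by
        rw [getD_set_ne vis node x hxn]; exact hxv
      exact ih hlen' hst' x hx hxv' t ht
  | case4 vis node rest hv h =>
    intro hlen hst
    exact absurd (hlen ▸ hst node List.mem_cons_self) h

theorem stComplete (adj : Nat → List Nat) (n : Nat) (Hadj : ∀ j u, u ∈ adj j → u < n)
    (vis : List Bool) (stack : List Nat) (hlen : vis.length = n) (hst : ∀ s ∈ stack, s < n)
    (s : Nat) (hs : s ∈ stack) : ∀ t, RA adj vis s t →
    (astack adj vis stack).getD t false = true := by
  intro t hra
  induction hra with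
  | base hb => exact stMarks adj n Hadj vis stack hlen hst s hs
  | step hru hmem hun ih =>
    exact stSat adj n Hadj vis stack hlen hst _ ih (RA_unvis hru) _ hmem

theorem stSound (adj : Nat → List Nat) (vis : List Bool) (stack : List Nat) :
    ∀ t, (astack adj vis stack).getD t false = true →
    vis.getD t false = true ∨ ∃ s ∈ stack, RA adj vis s t := by
  fun_induction astack adj vis stack with
  | case1 vis => intro t ht; exact Or.inl ht
  | case2 vis node rest hv ih =>
    intro t ht
    rcases ih t ht with h1 | ⟨s, hs, hr⟩
    · exact Or.inl h1
    · exact Or.inr ⟨s, List.mem_cons_of_mem _ hs, hr⟩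
  | case3 vis node rest hv h ih =>
    intro t ht
    have hnodef : vis.getD node false = false := by
      cases hb : vis.getD node false
      · rfl
      · exact absurd hb hv
    rcases ih t ht with h1 | ⟨s, hs, hr⟩
    · rcases (set_true_getD vis node t).mp h1 with ⟨rfl, _⟩ | h2
      · exact Or.inr ⟨t, List.mem_cons_self, RA.base hnodef⟩
      · exact Or.inl h2
    · have hrv : RA adj vis s t := RA_mono (vle_set vis node) hr
      rcases List.mem_append.mp hs with h1 | h2
      · have hsf := List.mem_reverse.mp h1
        have hsadj : s ∈ adj node := List.mem_of_mem_filter hsf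
        have hsun : (vis.set node true).getD s false = false := by
          have := (List.mem_filter.mp hsf).2
          simpa using this
        have hsun' : vis.getD s false = false := by
          cases hb : vis.getD s false
          · rfl
          · have := (vle_set vis node).2 s hb
            rw [this] at hsun
            exact absurd hsun (by simp)
        exact Or.inr ⟨node, List.mem_cons_self,
          RA_trans (RA.step (RA.base hnodef) hsadj hsun') hrv⟩
      · exact Or.inr ⟨s, List.mem_cons_of_mem _ h2, hrv⟩
  | case4 vis node rest hv h => intro t ht; exact Or.inl ht

-- ---- bridges between the ports and the abstract traversals ----

theorem pyIdx_wrap (n : Nat) (i : Int) (h : -(n : Int) ≤ i ∧ i < (n : Int)) :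
    PySem.List.pyIdx? n i = some (wrapI n i) := by
  unfold PySem.List.pyIdx? wrapI
  split_ifs <;> first | rfl | omega

theorem pyGetD_wrap {α : Type} (xs : List α) (n : Nat) (hn : xs.length = n) (i : Int)
    (h : -(n : Int) ≤ i ∧ i < (n : Int)) (d : α) :
    PySem.List.pyGetD xs i d = xs.getD (wrapI n i) d := by
  subst hn
  unfold PySem.List.pyGetD PySem.List.pyGet?
  rw [pyIdx_wrap _ i h]
  rw [List.getD_eq_getElem?_getD]
  rfl

theorem pySetD_wrap {α : Type} (xs : List α) (n : Nat) (hn : xs.length = n) (i : Int)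
    (h : -(n : Int) ≤ i ∧ i < (n : Int)) (v : α) :
    PySem.List.pySetD xs i v = xs.set (wrapI n i) v := by
  subst hn
  unfold PySem.List.pySetD PySem.List.pySet?
  rw [pyIdx_wrap _ i h]
  rfl

theorem wrapI_lt (n : Nat) (i : Int) (h : -(n : Int) ≤ i ∧ i < (n : Int)) : wrapI n i < n := by
  unfold wrapI
  split_ifs <;> omega

theorem edgeBound (G : List (List (Int × Int))) (hP : Pre_DFS G) (j : Nat) :
    ∀ uw ∈ G.getD j [], -(G.length : Int) ≤ uw.1 ∧ uw.1 < (G.length : Int) := by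
  intro uw huw
  rw [List.getD_eq_getElem?_getD] at huw
  cases hj : G[j]? with
  | none => rw [hj] at huw; simp at huw
  | some row =>
    rw [hj] at huw
    simp only [Option.getD_some] at huw
    exact hP row (List.mem_of_getElem? hj) uw huw

theorem adjA_lt (G : List (List (Int × Int))) (hP : Pre_DFS G) :
    ∀ j u, u ∈ adjA G j → u < G.length := by
  intro j u hu
  unfold adjA at hu
  rcases List.mem_map.mp hu with ⟨uw, huw, rfl⟩
  exact wrapI_lt _ _ (edgeBound G hP j uw huw)

theorem visitBridge (G : List (List (Int × Int))) (hP : Pre_DFS G) :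
    ∀ (f : Nat) (s : Int) (vis : List Bool), vis.length = G.length →
    -(G.length : Int) ≤ s ∧ s < (G.length : Int) →
    dfsVisitA G f s vis = avisit (adjA G) f (wrapI G.length s) vis := by
  intro f
  induction f with
  | zero => intro s vis _ _; rfl
  | succ f ih =>
    intro s vis hlen hs
    have hrow : PySem.List.pyGetD G s [] = G.getD (wrapI G.length s) [] :=
      pyGetD_wrap G G.length rfl s hs []
    have hinit : PySem.List.pySetD vis s true = vis.set (wrapI G.length s) true :=
      pySetD_wrap vis G.length hlen s hs true
    have inner : ∀ (row : List (Int × Int)),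
        (∀ uw ∈ row, -(G.length : Int) ≤ uw.1 ∧ uw.1 < (G.length : Int)) →
        ∀ (C : List Bool), C.length = G.length →
        row.foldl (fun vis uw => if PySem.List.pyGetD vis uw.1 false then vis
            else dfsVisitA G f uw.1 vis) C =
        row.foldl (fun v uw => if v.getD (wrapI G.length uw.1) false then v
            else avisit (adjA G) f (wrapI G.length uw.1) v) C := by
      intro row
      induction row with
      | nil => intro _ C _; rfl
      | cons uw row ihr =>
        intro hbnd C hClen
        have hb := hbnd uw List.mem_cons_self
        simp only [List.foldl_cons]
        rw [pyGetD_wrap C G.length hClen uw.1 hb false]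
        by_cases hc : C.getD (wrapI G.length uw.1) false = true
        · simp only [if_pos hc]
          exact ihr (fun x hx => hbnd x (List.mem_cons_of_mem _ hx)) C hClen
        · simp only [if_neg hc]
          rw [ih uw.1 C hClen hb]
          exact ihr (fun x hx => hbnd x (List.mem_cons_of_mem _ hx)) _
            (((aviGrow (adjA G) f (wrapI G.length uw.1) C).1).symm.trans hClen)
    simp only [dfsVisitA, avisit]
    rw [hrow, hinit]
    rw [show adjA G (wrapI G.length s)
        = (G.getD (wrapI G.length s) []).map (fun uw => wrapI G.length uw.1) from rfl]
    rw [List.foldl_map]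
    exact inner _ (edgeBound G hP _) _ (by simpa using hlen)

theorem stackBridge (G : List (List (Int × Int))) (hP : Pre_DFS G) :
    ∀ (vis : List Bool) (stack : List Int), vis.length = G.length →
    (∀ s ∈ stack, -(G.length : Int) ≤ s ∧ s < (G.length : Int)) →
    stackLoopB G vis stack = astack (adjA G) vis (stack.map (wrapI G.length)) := by
  intro vis stack
  fun_induction stackLoopB G vis stack with
  | case1 vis =>
    intro _ _
    exact (astack_nil _ _).symm
  | case2 vis node rest hv ih =>
    intro hlen hst
    have hbnd := hst node List.mem_cons_self
    have hget := pyGetD_wrap vis G.length hlen node hbnd false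
    rw [List.map_cons, astack_cons_vis _ _ _ _ (by rw [← hget]; exact hv)]
    exact ih hlen (fun x hx => hst x (List.mem_cons_of_mem _ hx))
  | case3 vis node rest hv h ih =>
    intro hlen hst
    have hbnd := hst node List.mem_cons_self
    have hget := pyGetD_wrap vis G.length hlen node hbnd false
    have hsetb := pySetD_wrap vis G.length hlen node hbnd true
    have hrow : PySem.List.pyGetD G node [] = G.getD (wrapI G.length node) [] :=
      pyGetD_wrap G G.length rfl node hbnd []
    have hwlt : wrapI G.length node < vis.length := by
      rw [hlen]; exact wrapI_lt _ _ hbnd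
    have hof : ¬ (vis.getD (wrapI G.length node) false = true) := by
      rw [← hget]; exact hv
    have hlen2 : (vis.set (wrapI G.length node) true).length = G.length := by
      simpa using hlen
    have hlen' : (PySem.List.pySetD vis node true).length = G.length := by
      rw [hsetb]; exact hlen2
    have hst' : ∀ x ∈ ((((PySem.List.pyGetD G node []).filter
        (fun uw => !PySem.List.pyGetD (PySem.List.pySetD vis node true) uw.1 false)).map
          (fun uw => uw.1)).reverse ++ rest),
        -(G.length : Int) ≤ x ∧ x < (G.length : Int) := by
      intro x hx
      rcases List.mem_append.mp hx with hx1 | hx2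
      · rcases List.mem_map.mp (List.mem_reverse.mp hx1) with ⟨uw, huw, rfl⟩
        have hmem : uw ∈ PySem.List.pyGetD G node [] := List.mem_of_mem_filter huw
        rw [hrow] at hmem
        exact edgeBound G hP (wrapI G.length node) uw hmem
      · exact hst x (List.mem_cons_of_mem _ hx2)
    rw [List.map_cons, astack_cons_unvis _ _ _ _ hof hwlt]
    rw [ih hlen' hst']
    rw [hsetb, hrow]
    congr 1
    rw [List.map_append, List.map_reverse, List.map_map]
    congr 1
    congr 1
    have hfeq : (G.getD (wrapI G.length node) []).filter
          (fun uw => !PySem.List.pyGetD (vis.set (wrapI G.length node) true) uw.1 false)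
        = (G.getD (wrapI G.length node) []).filter
          ((fun u => !(vis.set (wrapI G.length node) true).getD u false)
            ∘ (fun uw => wrapI G.length uw.1)) := by
      apply List.filter_congr
      intro uw huw
      have hbuw := edgeBound G hP (wrapI G.length node) uw huw
      simp only [Function.comp]
      rw [pyGetD_wrap (vis.set (wrapI G.length node) true) G.length hlen2 uw.1 hbuw false]
    rw [hfeq]
    rw [show adjA G (wrapI G.length node)
        = (G.getD (wrapI G.length node) []).map (fun uw => wrapI G.length uw.1) from rfl]
    rw [List.filter_map]
    rfl
  | case4 vis node rest hv h =>
    intro hlen hst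
    exact absurd (show PySem.Raise.InRange vis.length node by
      rw [hlen]; exact hst node List.mem_cons_self) h

-- ---- outer loop of A once cnt = 1: it is exactly an all-visited check ----

theorem outerAll (G : List (List (Int × Int))) :
    ∀ (l : List Int) (T : List Bool),
    dfsOuterA G l T 1 = l.all (fun v => PySem.List.pyGetD T v false) := by
  intro l
  induction l with
  | nil => intro T; rfl
  | cons v vs ih =>
    intro T
    simp only [dfsOuterA, List.all_cons]
    by_cases hc : PySem.List.pyGetD T v false = true
    · simp only [if_pos hc]
      rw [if_neg (by decide : ¬ (((1:Int) == 2) = true))]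
      rw [ih T, hc]
      simp
    · simp only [if_neg hc]
      rw [if_pos (by decide : (((1:Int) + 1 == 2) = true))]
      have : PySem.List.pyGetD T v false = false := by
        cases hb : PySem.List.pyGetD T v false
        · rfl
        · exact absurd hb hc
      rw [this]
      simp

theorem getD_replicate_false (n t : Nat) : (List.replicate n false).getD t false = false := by
  rw [List.getD_eq_getElem?_getD, List.getElem?_replicate]
  split <;> rfl

-- ===== VERDICT (by name: the statement is the Claim_ definition above) =====
theorem DFS_spec : Claim_equal_DFS := by
  intro G _ hP
  unfold Spec_DFS
  by_cases hn0 : G.length = 0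
  · have hGnil : G = [] := List.length_eq_zero_iff.mp hn0
    subst hGnil
    rfl
  · have hnpos : 0 < G.length := Nat.pos_of_ne_zero hn0
    have hvlen : (List.replicate G.length false).length = G.length := List.length_replicate
    have Hadj := adjA_lt G hP
    have hb0 : -(G.length : Int) ≤ (0:Int) ∧ (0:Int) < (G.length : Int) :=
      ⟨by omega, by exact_mod_cast hnpos⟩
    have hw0 : wrapI G.length 0 = 0 := rfl
    have hcons : PySem.List.pyRange 0 (G.length : Int) 1
        = 0 :: PySem.List.pyRange 1 (G.length : Int) 1 := by
      have := PySem.List.pyRange_one_cons (a := 0) (b := (G.length : Int))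
        (by exact_mod_cast hnpos)
      simpa using this
    have hA : DFS G = (PySem.List.pyRange 1 (G.length : Int) 1).all
        (fun v => PySem.List.pyGetD
          (dfsVisitA G G.length 0 (List.replicate G.length false)) v false) := by
      unfold DFS
      rw [hcons]
      have hc0 : PySem.List.pyGetD (List.replicate G.length false) (0:Int) false = false := by
        rw [PySem.List.pyGetD_zero]
        exact getD_replicate_false _ _
      simp only [dfsOuterA, if_neg (by rw [hc0]; simp : ¬ (PySem.List.pyGetD
        (List.replicate G.length false) (0:Int) false = true))]
      rw [if_neg (by decide : ¬ (((0:Int) + 1 == 2) = true))]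
      exact outerAll G _ _
    have hTA : dfsVisitA G G.length 0 (List.replicate G.length false)
        = avisit (adjA G) G.length 0 (List.replicate G.length false) := by
      have := visitBridge G hP G.length 0 (List.replicate G.length false) hvlen hb0
      rw [hw0] at this
      exact this
    have hTS : stackLoopB G (List.replicate G.length false) [0]
        = astack (adjA G) (List.replicate G.length false) [0] := by
      have := stackBridge G hP (List.replicate G.length false) [0] hvlen (by
        intro s hs
        have : s = 0 := by simpa using hs
        subst this
        exact hb0)
      simpa [hw0] using this
    rw [hA, hTA]
    unfold DFS_alt
    rw [if_neg hn0, hTS]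
    have hv0 : (List.replicate G.length false).getD 0 false = false := getD_replicate_false _ _
    have hvall : ∀ t, (List.replicate G.length false).getD t false = false :=
      fun t => getD_replicate_false _ _
    have hcnt : (List.replicate G.length false).count false ≤ G.length := by
      simp
    have charA : ∀ t, (avisit (adjA G) G.length 0 (List.replicate G.length false)).getD t false
        = true ↔ RA (adjA G) (List.replicate G.length false) 0 t := by
      intro t
      constructor
      · intro h
        rcases aviSound (adjA G) G.length 0 (List.replicate G.length false) t hv0 h with h1 | h2
        · rw [hvall t] at h1; exact absurd h1 (by simp)
        · exact h2
      · exact aviComplete (adjA G) G.length Hadj G.length 0 (List.replicate G.length false)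
          hvlen hnpos hv0 hcnt t
    have charS : ∀ t, (astack (adjA G) (List.replicate G.length false) [0]).getD t false
        = true ↔ RA (adjA G) (List.replicate G.length false) 0 t := by
      intro t
      constructor
      · intro h
        rcases stSound (adjA G) (List.replicate G.length false) [0] t h with h1 | ⟨s, hs, hr⟩
        · rw [hvall t] at h1; exact absurd h1 (by simp)
        · have : s = 0 := by simpa using hs
          subst this
          exact hr
      · intro h
        exact stComplete (adjA G) G.length Hadj (List.replicate G.length false) [0] hvlen
          (by intro s hs
              have : s = 0 := by simpa using hs
              subst this
              exact hnpos)
          0 (by simp) t h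
    have hTeq : ∀ t, (avisit (adjA G) G.length 0 (List.replicate G.length false)).getD t false
        = (astack (adjA G) (List.replicate G.length false) [0]).getD t false := by
      intro t
      by_cases h : RA (adjA G) (List.replicate G.length false) 0 t
      · rw [(charA t).mpr h, (charS t).mpr h]
      · cases ha : (avisit (adjA G) G.length 0 (List.replicate G.length false)).getD t false
        · cases hb : (astack (adjA G) (List.replicate G.length false) [0]).getD t false
          · rfl
          · exact absurd ((charS t).mp hb) h
        · exact absurd ((charA t).mp ha) h
    have hTAlen : (avisit (adjA G) G.length 0 (List.replicate G.length false)).length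
        = G.length :=
      ((aviGrow (adjA G) G.length 0 (List.replicate G.length false)).1).symm.trans hvlen
    have hTSlen : (astack (adjA G) (List.replicate G.length false) [0]).length = G.length :=
      ((stGrow (adjA G) (List.replicate G.length false) [0]).1).symm.trans hvlen
    rw [Bool.eq_iff_iff]
    simp only [List.all_eq_true]
    constructor
    · intro hall b hb
      rcases List.mem_iff_getElem.mp hb with ⟨i, hi, rfl⟩
      have hgoal : (astack (adjA G) (List.replicate G.length false) [0]).getD i false = true := by
        rw [← hTeq i]
        by_cases hi0 : i = 0
        · subst hi0
          exact (charA 0).mpr (RA.base hv0)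
        · have hiN : i < G.length := hTSlen ▸ hi
          have hv := hall (i : Int) (by
            rw [PySem.List.mem_pyRange_one]
            constructor
            · omega
            · exact_mod_cast hiN)
          rw [pyGetD_wrap _ G.length hTAlen (i : Int)
            ⟨by omega, by exact_mod_cast hiN⟩ false] at hv
          have hwi : wrapI G.length (i : Int) = i := by simp [wrapI]
          rwa [hwi] at hv
      rw [List.getD_eq_getElem?_getD, List.getElem?_eq_getElem hi] at hgoal
      simpa using hgoal
    · intro hall v hv
      rw [PySem.List.mem_pyRange_one] at hv
      have hlt : v.toNat < G.length := by omega
      rw [pyGetD_wrap _ G.length hTAlen v ⟨by omega, by omega⟩ false]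
      have hwv : wrapI G.length v = v.toNat := by
        unfold wrapI
        rw [if_pos (by omega : (0:Int) ≤ v)]
      rw [hwv, hTeq]
      have hlt' : v.toNat < (astack (adjA G) (List.replicate G.length false) [0]).length := by
        rw [hTSlen]; exact hlt
      have hmem : (astack (adjA G) (List.replicate G.length false) [0])[v.toNat] = true :=
        hall _ (List.getElem_mem hlt')
      rw [List.getD_eq_getElem?_getD, List.getElem?_eq_getElem hlt']
      simpa using hmem
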